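-- pv_equiv track=rewrite | github.com/whuang67/Python | CS412/CS 412 hw3_verson1.py | getMaxPattern
-- ===== SOURCE A (Python) =====
-- import itertools
--
-- def getSubsets(row):
--     row = sorted(row)
--     subsets = []
--     for i in range(1, len(row)+1):
--         temp = list(itertools.combinations(row, i))
--         subsets.extend(temp)
--     return subsets
--
-- def getPool(matrix):
--     pool = []
--     for row in matrix:
--         pool.extend(getSubsets(row))
--     return pool
--
-- def getSupport(matrix):
--     itemsets = getPool(matrix)
--     sup_dict = {}
--     for pattern in itemsets:
--         sup_dict[pattern] = sup_dict.get(pattern, 0) + 1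
--     return sup_dict
--
-- def getFreqPattern(sup_dict, min_sup):
--     freq_pattern = {}
--     for pattern, count in sup_dict.items():
--         if count >= min_sup:
--             freq_pattern[pattern] = count
--     return freq_pattern
--
-- def getSupersets(freq_pattern):
--     supersets = {}
--     for key1 in freq_pattern.keys():
--         superset = []
--         for key2 in freq_pattern.keys():
--             if set(list(key1)).issubset(set(list(key2))) and key1 != key2:
--                 superset.append(key2)
--         supersets[key1] = superset
--     return supersets
--
-- def getMaxPattern(matrix, min_sup):
--     support = getSupport(matrix)
--     freq_pattern = getFreqPattern(support, min_sup)
--     supersets = getSupersets(freq_pattern)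
--     max_pattern = {}
--     for key1, value1 in supersets.items():
--         cond = [support[key2] < min_sup for key2 in value1]
--         if all(cond):
--             max_pattern[key1] = support[key1]
--     return max_pattern
-- ===== SOURCE B (Python) =====
-- import itertools
--
--
-- def _canon(k):
--     # distinct items of the already-sorted tuple k, in order
--     out = []
--     for x in k:
--         if not out or out[-1] != x:
--             out.append(x)
--     return tuple(out)
--
--
-- def getMaxPattern(matrix, min_sup):
--     # count support of every sub-combination, one pass
--     support = {}
--     for row in matrix:
--         r = sorted(row)
--         for i in range(1, len(r) + 1):
--             for t in itertools.combinations(r, i):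
--                 support[t] = support.get(t, 0) + 1
--     frequent = [(k, c) for k, c in support.items() if c >= min_sup]
--     # count frequent tuples per distinct underlying item-set (canonical form)
--     set_count = {}
--     for k, _ in frequent:
--         s = _canon(k)
--         set_count[s] = set_count.get(s, 0) + 1
--     # decide domination once per distinct item-set, not once per frequent tuple
--     fsets = [frozenset(s) for s in set_count]
--     dominated = {s: any(fs < t for t in fsets)
--                  for s, fs in zip(set_count, fsets)}
--     # a frequent tuple is maximal iff its item-set is carried by no other
--     # frequent tuple and is strictly contained in no other frequent item-set
--     result = {}
--     for k, c in frequent: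
--         s = _canon(k)
--         if set_count[s] == 1 and not dominated[s]:
--             result[k] = c
--     return result
-- ===== Notes on version B (the rewrite author's own statement) =====
-- stated objective: faster
-- what changed: B replaces A's all-pairs frequent-tuple set-subset scan (with its vacuous support re-checks) by counting frequent tuples per canonical distinct item-set and deciding strict containment once per distinct item-set (D <= F of them) instead of once per tuple pair.
import Mathlib
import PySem

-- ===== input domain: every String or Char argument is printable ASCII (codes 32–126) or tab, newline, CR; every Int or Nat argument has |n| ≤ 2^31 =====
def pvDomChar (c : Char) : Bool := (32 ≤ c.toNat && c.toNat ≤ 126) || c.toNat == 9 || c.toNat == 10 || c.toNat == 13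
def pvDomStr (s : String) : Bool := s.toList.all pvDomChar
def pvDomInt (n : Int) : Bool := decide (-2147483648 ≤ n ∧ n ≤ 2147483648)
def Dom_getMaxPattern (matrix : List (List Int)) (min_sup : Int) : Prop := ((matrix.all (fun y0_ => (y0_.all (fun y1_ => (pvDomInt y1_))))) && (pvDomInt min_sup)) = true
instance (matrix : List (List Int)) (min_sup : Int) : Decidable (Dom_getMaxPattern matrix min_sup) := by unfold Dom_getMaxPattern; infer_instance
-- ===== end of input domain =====

-- ===== PORT A =====
-- shared library helper: itertools.combinations(r, i) over a list, in itertools' order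
-- (not provided by PySem); used by both ports, as both Pythons call itertools.combinations
def pyCombinations : List Int → Nat → List (List Int)
  | _, 0 => [[]]
  | [], _ + 1 => []
  | x :: xs, i + 1 => (pyCombinations xs i).map (fun t => x :: t) ++ pyCombinations xs (i + 1)

def getSubsetsA (row : List Int) : List (List Int) :=
  let r := PySem.List.sorted row id
  (PySem.List.pyRange 1 ((r.length : Int) + 1) 1).foldl
    (fun subsets i => subsets ++ pyCombinations r i.toNat) []

def getPoolA (matrix : List (List Int)) : List (List Int) :=
  matrix.foldl (fun pool row => pool ++ getSubsetsA row) []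

def getSupportA (matrix : List (List Int)) : PySem.Dict (List Int) Int :=
  (getPoolA matrix).foldl (fun d pattern => d.insert pattern (d.getD pattern 0 + 1)) PySem.Dict.empty

def getFreqPatternA (sup_dict : PySem.Dict (List Int) Int) (min_sup : Int) :
    PySem.Dict (List Int) Int :=
  sup_dict.items.foldl
    (fun freq p => if p.2 ≥ min_sup then freq.insert p.1 p.2 else freq) PySem.Dict.empty

-- set(list(key1)).issubset(set(list(key2)))
def issubA (key1 key2 : List Int) : Bool :=
  PySem.Set.issubset (PySem.Set.ofList key1) (PySem.Set.ofList key2)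

def getSupersetsA (freq : PySem.Dict (List Int) Int) : PySem.Dict (List Int) (List (List Int)) :=
  freq.keys.foldl
    (fun supersets key1 =>
      supersets.insert key1
        (freq.keys.foldl
          (fun superset key2 =>
            if issubA key1 key2 && !(key1 == key2) then superset ++ [key2] else superset)
          []))
    PySem.Dict.empty

def getMaxPattern (matrix : List (List Int)) (min_sup : Int) : List (List Int × Int) :=
  let support := getSupportA matrix
  let freq_pattern := getFreqPatternA support min_sup
  let supersets := getSupersetsA freq_pattern
  (supersets.items.foldl
    (fun max_pattern p =>
      let cond := p.2.map (fun key2 => decide (support.getD key2 0 < min_sup))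
      if cond.all (fun b => b) then max_pattern.insert p.1 (support.getD p.1 0) else max_pattern)
    PySem.Dict.empty).items

-- ===== PORT B =====
-- _canon: distinct items of the already-sorted tuple, in order
-- (appends x unless it equals the last element kept, i.e. `if not out or out[-1] != x`)
def canonB (k : List Int) : List Int :=
  k.foldl (fun out x => if out.getLast? == some x then out else out ++ [x]) []

def supportB (matrix : List (List Int)) : PySem.Dict (List Int) Int :=
  matrix.foldl
    (fun d row =>
      let r := PySem.List.sorted row id
      (PySem.List.pyRange 1 ((r.length : Int) + 1) 1).foldl
        (fun d i => (pyCombinations r i.toNat).foldl (fun d t => d.insert t (d.getD t 0 + 1)) d) d)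
    PySem.Dict.empty

def getMaxPattern_alt (matrix : List (List Int)) (min_sup : Int) : List (List Int × Int) :=
  let support := supportB matrix
  let frequent := support.items.filter (fun p => p.2 ≥ min_sup)
  let set_count := frequent.foldl
    (fun d p => d.insert (canonB p.1) (d.getD (canonB p.1) 0 + 1))
      (PySem.Dict.empty : PySem.Dict (List Int) Int)
  let sets := set_count.keys
  -- fs < t on the frozensets of two distinct canonical (sorted, duplicate-free) tuples
  -- is exactly: fewer elements, and every element contained in t
  let dominated := sets.foldl
    (fun d s => d.insert s
      (sets.any (fun t => decide (s.length < t.length) && s.all (fun x => t.contains x))))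
    (PySem.Dict.empty : PySem.Dict (List Int) Bool)
  (frequent.foldl
    (fun result p =>
      let s := canonB p.1
      if set_count.getD s 0 == 1 && !(dominated.getD s false)
      then result.insert p.1 p.2
      else result)
    PySem.Dict.empty).items

-- ===== PRECONDITION & SPEC =====
def Spec_getMaxPattern (matrix : List (List Int)) (min_sup : Int) (out : List (List Int × Int)) : Prop := out = getMaxPattern_alt matrix min_sup
instance (matrix : List (List Int)) (min_sup : Int) (out : List (List Int × Int)) : Decidable (Spec_getMaxPattern matrix min_sup out) := by unfold Spec_getMaxPattern; infer_instance

-- ===== CLAIM (what is proved, stated in full; the proofs are below) =====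
def Claim_equal_getMaxPattern : Prop := ∀ (matrix : List (List Int)) (min_sup : Int), Dom_getMaxPattern matrix min_sup → Spec_getMaxPattern matrix min_sup (getMaxPattern matrix min_sup)

-- ===== LEMMAS AND PROOFS =====

-- folding f over a list built by appending pieces = folding the pieces one by one
theorem foldl_of_foldl_append {α γ σ : Type} (g : α → List γ) (f : σ → γ → σ) :
    ∀ (l : List α) (acc : List γ) (d : σ),
      (l.foldl (fun a x => a ++ g x) acc).foldl f d =
        l.foldl (fun d x => (g x).foldl f d) (acc.foldl f d)
  | [], acc, d => rfl
  | x :: l, acc, d => by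
      rw [List.foldl_cons, List.foldl_cons, foldl_of_foldl_append g f l (acc ++ g x) d,
        List.foldl_append]

theorem dict_items_empty {κ ν : Type} : (PySem.Dict.empty : PySem.Dict κ ν).items = [] := rfl

theorem supportB_eq (matrix : List (List Int)) : supportB matrix = getSupportA matrix := by
  unfold supportB getSupportA getPoolA
  rw [foldl_of_foldl_append]
  refine (PySem.List.foldl_congr_mem matrix _ _ _ (fun d row _ => ?_)).symm
  unfold getSubsetsA
  rw [foldl_of_foldl_append]
  rfl

theorem pyComb_sublist : ∀ (r : List Int) (i : Nat) {t : List Int},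
    t ∈ pyCombinations r i → t.Sublist r := by
  intro r
  induction r with
  | nil =>
    intro i t ht
    cases i with
    | zero => simp only [pyCombinations, List.mem_singleton] at ht; simp [ht]
    | succ n => simp [pyCombinations] at ht
  | cons x xs ih =>
    intro i t ht
    cases i with
    | zero => simp only [pyCombinations, List.mem_singleton] at ht; simp [ht]
    | succ n =>
      simp only [pyCombinations, List.mem_append, List.mem_map] at ht
      rcases ht with ⟨u, hu, rfl⟩ | ht
      · exact (ih n hu).cons₂ x
      · exact (ih (n + 1) ht).cons x

theorem nodup_support_keys (matrix : List (List Int)) : (getSupportA matrix).keys.Nodup := by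
  unfold getSupportA
  exact PySem.Dict.nodup_keys_foldl_insert _ _ _ (by simp)

theorem mem_support_key_sorted {matrix : List (List Int)} {k : List Int}
    (hk : k ∈ (getSupportA matrix).keys) : k.Pairwise (· ≤ ·) := by
  unfold getSupportA at hk
  rw [PySem.Dict.keys_foldl_insert] at hk
  have hk' : k ∈ getPoolA matrix := by
    rcases (PySem.Set.mem_update _ _ _).mp hk with h | h
    · simp at h
    · exact h
  unfold getPoolA at hk'
  rw [PySem.List.foldl_append_eq_flatMap, List.nil_append, List.mem_flatMap] at hk'
  obtain ⟨row, -, hk2⟩ := hk'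
  unfold getSubsetsA at hk2
  rw [PySem.List.foldl_append_eq_flatMap, List.nil_append, List.mem_flatMap] at hk2
  obtain ⟨i, -, hk3⟩ := hk2
  have hsub := pyComb_sublist _ _ hk3
  have hsorted := PySem.List.sorted_pairwise row (id : Int → Int)
  exact List.Pairwise.sublist hsub (by simpa using hsorted)

-- a conditional-insert loop over fresh distinct keys appends exactly the filtered items
theorem items_foldl_insert_if (pred : List Int × Int → Prop) [DecidablePred pred] :
    ∀ (l : List (List Int × Int)) (d : PySem.Dict (List Int) Int),
      (∀ p ∈ l, d.contains p.1 = false) → (l.map (·.1)).Nodup →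
      (l.foldl (fun f p => if pred p then f.insert p.1 p.2 else f) d).items
        = d.items ++ l.filter (fun p => decide (pred p))
  | [], d, _, _ => by simp
  | p :: l, d, hfresh, hnd => by
    simp only [List.map_cons, List.nodup_cons] at hnd
    obtain ⟨hp1, hndl⟩ := hnd
    simp only [List.foldl_cons, List.filter_cons]
    by_cases hp : pred p
    · rw [if_pos hp, items_foldl_insert_if pred l (d.insert p.1 p.2) ?_ hndl]
      · rw [PySem.Dict.items_insert_of_not_contains _ _ (hfresh p (by simp))]
        simp [hp]
      · intro q hq
        rw [PySem.Dict.contains_insert]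
        have hne : (q.1 == p.1) = false := by
          simp only [beq_eq_false_iff_ne, ne_eq]
          intro hqe
          exact hp1 (hqe ▸ List.mem_map_of_mem hq)
        simp [hne, hfresh q (List.mem_cons_of_mem _ hq)]
    · rw [if_neg hp, items_foldl_insert_if pred l d (fun q hq => hfresh q (List.mem_cons_of_mem _ hq)) hndl]
      simp [hp]

theorem freq_items (support : PySem.Dict (List Int) Int) (min_sup : Int)
    (hnd : support.keys.Nodup) :
    (getFreqPatternA support min_sup).items
      = support.items.filter (fun p => decide (p.2 ≥ min_sup)) := by
  unfold getFreqPatternA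
  rw [items_foldl_insert_if (fun p => p.2 ≥ min_sup) support.items PySem.Dict.empty
    (fun p _ => by simp) (by simpa [PySem.Dict.keys] using hnd)]
  simp [dict_items_empty]

theorem issubA_iff (a b : List Int) : issubA a b = true ↔ ∀ x ∈ a, x ∈ b := by
  unfold issubA
  rw [PySem.Set.issubset_iff]
  constructor
  · intro h x hx
    exact (PySem.Set.mem_ofList _ _).mp (h x ((PySem.Set.mem_ofList _ _).mpr hx))
  · intro h x hx
    exact (PySem.Set.mem_ofList _ _).mpr (h x ((PySem.Set.mem_ofList _ _).mp hx))

theorem supersets_items (freq : PySem.Dict (List Int) Int) (hnd : freq.keys.Nodup) :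
    (getSupersetsA freq).items
      = freq.keys.map (fun k1 =>
          (k1, freq.keys.filter (fun k2 => issubA k1 k2 && !(k1 == k2)))) := by
  unfold getSupersetsA
  have h := PySem.Dict.items_foldl_insert_fresh freq.keys (fun a => a)
      (fun k1 => freq.keys.foldl
        (fun superset k2 =>
          if issubA k1 k2 && !(k1 == k2) then superset ++ [k2] else superset) [])
      PySem.Dict.empty (fun a _ => by simp) (by simpa using hnd)
  rw [h, dict_items_empty, List.nil_append]
  refine List.map_congr_left (fun k1 _ => ?_)
  dsimp only
  rw [PySem.List.foldl_append_if (fun k2 => issubA k1 k2 && !(k1 == k2)) (fun k2 => k2)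
    freq.keys []]
  simp

-- membership in canonB is membership
theorem canonB_append (l : List Int) (x : Int) :
    canonB (l ++ [x])
      = if (canonB l).getLast? == some x then canonB l else canonB l ++ [x] := by
  unfold canonB
  rw [List.foldl_append]
  rfl

theorem mem_canonB (l : List Int) (x : Int) : x ∈ canonB l ↔ x ∈ l := by
  induction l using List.reverseRecOn with
  | nil => simp [canonB]
  | append_singleton l y ih =>
    rw [canonB_append]
    by_cases h : ((canonB l).getLast? == some y) = true
    · have hy : y ∈ canonB l := List.mem_of_getLast? (beq_iff_eq.mp h)
      rw [if_pos h]
      simp only [List.mem_append, List.mem_singleton]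
      constructor
      · intro hx; exact Or.inl (ih.mp hx)
      · rintro (hx | rfl)
        · exact ih.mpr hx
        · exact hy
    · rw [if_neg h]
      simp [List.mem_append, ih]

theorem le_getLast_of_pairwise_lt {l : List Int} {m a : Int}
    (hp : l.Pairwise (· < ·)) (hm : l.getLast? = some m) (ha : a ∈ l) : a ≤ m := by
  obtain ⟨l', rfl⟩ := List.getLast?_eq_some_iff.mp hm
  rw [List.pairwise_append] at hp
  rcases List.mem_append.mp ha with h | h
  · exact le_of_lt (hp.2.2 a h m (by simp))
  · simp only [List.mem_singleton] at h
    exact le_of_eq h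

theorem canonB_invariant : ∀ (l : List Int), l.Pairwise (· ≤ ·) →
    (canonB l).Pairwise (· < ·) ∧ (canonB l).getLast? = l.getLast? := by
  intro l
  induction l using List.reverseRecOn with
  | nil => intro _; simp [canonB]
  | append_singleton l y ih =>
    intro h
    rw [List.pairwise_append] at h
    obtain ⟨hl, -, hbound⟩ := h
    obtain ⟨hsort, hlast⟩ := ih hl
    rw [canonB_append]
    by_cases hb : ((canonB l).getLast? == some y) = true
    · rw [if_pos hb]
      exact ⟨hsort, (beq_iff_eq.mp hb).trans List.getLast?_concat.symm⟩
    · rw [if_neg hb]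
      refine ⟨?_, by simp⟩
      rw [List.pairwise_append]
      refine ⟨hsort, List.pairwise_singleton _ _, ?_⟩
      intro a ha b hb'
      simp only [List.mem_singleton] at hb'
      subst hb'
      have hal : a ∈ l := (mem_canonB l a).mp ha
      have haley : a ≤ b := hbound a hal b (by simp)
      rcases lt_or_eq_of_le haley with hlt | rfl
      · exact hlt
      · exfalso
        obtain ⟨m, hm⟩ : ∃ m, (canonB l).getLast? = some m := by
          cases hcl : (canonB l).getLast? with
          | none => exact absurd (List.getLast?_eq_none_iff.mp hcl ▸ ha) (List.not_mem_nil)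
          | some m => exact ⟨m, rfl⟩
        have hmy : m ≤ a := hbound m ((mem_canonB l m).mp (List.mem_of_getLast? hm)) a (by simp)
        have hym : a ≤ m := le_getLast_of_pairwise_lt hsort hm ha
        have : m = a := le_antisymm hmy hym
        rw [hm, this] at hb
        simp at hb

theorem sorted_lt_ext {s t : List Int} (hs : s.Pairwise (· < ·)) (ht : t.Pairwise (· < ·))
    (h : ∀ x, x ∈ s ↔ x ∈ t) : s = t := by
  have hns : s.Nodup := hs.imp (fun h => ne_of_lt h)
  have hnt : t.Nodup := ht.imp (fun h => ne_of_lt h)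
  have hperm : s.Perm t := (List.perm_ext_iff_of_nodup hns hnt).mpr h
  exact List.Perm.eq_of_pairwise
    (fun a b _ _ hab hba => le_antisymm hab hba)
    (hs.imp le_of_lt) (ht.imp le_of_lt) hperm

theorem map_nodup_inj {α β : Type} {f : α → β} {l : List α}
    (hnd : (l.map f).Nodup) {p q : α} (hp : p ∈ l) (hq : q ∈ l) (hf : f p = f q) : p = q :=
  List.inj_on_of_nodup_map hnd hp hq hf

theorem countP_eq_one_iff {α : Type} (p : α → Bool) :
    ∀ (l : List α), l.Nodup → ∀ {a : α}, a ∈ l → p a = true →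
      (l.countP p = 1 ↔ ∀ b ∈ l, p b = true → b = a) := by
  intro l
  induction l with
  | nil => intro _ a ha; simp at ha
  | cons x l ih =>
    intro hnd a ha hpa
    simp only [List.nodup_cons] at hnd
    obtain ⟨hx, hndl⟩ := hnd
    rcases List.mem_cons.mp ha with rfl | hal
    · have hc : (a :: l).countP p = l.countP p + 1 := by
        rw [List.countP_cons, hpa]
        simp
      rw [hc]
      constructor
      · intro h b hb hpb
        rcases List.mem_cons.mp hb with rfl | hbl
        · rfl
        · exfalso
          have h0 : l.countP p = 0 := by omega
          exact (List.countP_eq_zero.mp h0) b hbl hpb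
      · intro h
        have h0 : l.countP p = 0 := by
          rw [List.countP_eq_zero]
          intro b hb hpb
          exact hx ((h b (List.mem_cons_of_mem _ hb) hpb) ▸ hb)
        omega
    · by_cases hpx : p x = true
      · have hc : (x :: l).countP p = l.countP p + 1 := by
          rw [List.countP_cons, hpx]
          simp
        rw [hc]
        constructor
        · intro h
          exfalso
          have hpos : 0 < l.countP p := List.countP_pos_iff.mpr ⟨a, hal, hpa⟩
          omega
        · intro h
          exact absurd (h x (by simp) hpx) (fun he => hx (he ▸ hal))
      · have hc : (x :: l).countP p = l.countP p := by
          rw [List.countP_cons]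
          simp [hpx]
        rw [hc, ih hndl hal hpa]
        constructor
        · intro h b hb hpb
          rcases List.mem_cons.mp hb with rfl | hbl
          · exact absurd hpb hpx
          · exact h b hbl hpb
        · intro h b hb hpb
          exact h b (List.mem_cons_of_mem _ hb) hpb

-- the heart: A's per-key maximality test equals B's canonical-set test
theorem pv_maximal_iff (K : List (List Int)) (hK : ∀ k2 ∈ K, k2.Pairwise (· ≤ ·))
    (k : List Int) (hks : k.Pairwise (· ≤ ·)) :
    (∀ k2 ∈ K, ¬((∀ x ∈ k, x ∈ k2) ∧ k ≠ k2)) ↔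
    ((∀ k2 ∈ K, canonB k2 = canonB k → k2 = k) ∧
     ∀ k2 ∈ K, ¬((canonB k).length < (canonB k2).length ∧ ∀ x ∈ canonB k, x ∈ canonB k2)) := by
  constructor
  · intro hA
    constructor
    · intro k2 h2 hcan
      by_contra hne
      refine hA k2 h2 ⟨fun x hx => ?_, fun he => hne he.symm⟩
      exact (mem_canonB k2 x).mp (hcan.symm ▸ (mem_canonB k x).mpr hx)
    · rintro k2 h2 ⟨hlen, hsub⟩
      refine hA k2 h2 ⟨fun x hx => (mem_canonB k2 x).mp (hsub x ((mem_canonB k x).mpr hx)), ?_⟩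
      rintro rfl
      exact absurd hlen (lt_irrefl _)
  · rintro ⟨h1, h2⟩ k2 hk2 ⟨hsub, hne⟩
    have hck : (canonB k).Pairwise (· < ·) := (canonB_invariant k hks).1
    have hck2 : (canonB k2).Pairwise (· < ·) := (canonB_invariant k2 (hK k2 hk2)).1
    have hsubc : ∀ x ∈ canonB k, x ∈ canonB k2 :=
      fun x hx => (mem_canonB k2 x).mpr (hsub x ((mem_canonB k x).mp hx))
    by_cases heq : ∀ x, x ∈ canonB k ↔ x ∈ canonB k2
    · exact hne ((h1 k2 hk2 (sorted_lt_ext hck2 hck (fun x => (heq x).symm)))).symm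
    · have hnodk : (canonB k).Nodup := hck.imp (fun h => ne_of_lt h)
      have hsp : (canonB k).Subperm (canonB k2) :=
        List.subperm_of_subset hnodk (fun x hx => hsubc x hx)
      have hlt : (canonB k).length < (canonB k2).length := by
        rcases lt_or_eq_of_le hsp.length_le with h | h
        · exact h
        · exfalso
          exact heq (fun x => (hsp.perm_of_length_le (le_of_eq h.symm)).mem_iff)
      exact h2 k2 hk2 ⟨hlt, hsubc⟩

theorem condA_iff (support : PySem.Dict (List Int) Int) (min_sup : Int)
    (hnd : support.keys.Nodup) (k : List Int) :
    (((((support.items.filter (fun p => decide (p.2 ≥ min_sup))).map (fun p => p.1)).filter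
          (fun k2 => issubA k k2 && !(k == k2))).map
        (fun key2 => decide (support.getD key2 0 < min_sup))).all (fun b => b)) = true
      ↔ ∀ k2 ∈ (support.items.filter (fun p => decide (p.2 ≥ min_sup))).map (fun p => p.1),
          ¬((∀ x ∈ k, x ∈ k2) ∧ k ≠ k2) := by
  rw [List.all_eq_true]
  constructor
  · rintro h k2 hk2 ⟨hsub, hne⟩
    have hmem : k2 ∈ ((support.items.filter (fun p => decide (p.2 ≥ min_sup))).map
        (fun p => p.1)).filter (fun k2 => issubA k k2 && !(k == k2)) := by
      refine List.mem_filter.mpr ⟨hk2, ?_⟩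
      rw [Bool.and_eq_true]
      exact ⟨(issubA_iff k k2).mpr hsub, by simp [hne]⟩
    have hthis := h _ (List.mem_map_of_mem hmem)
    obtain ⟨p2, hp2, rfl⟩ := List.mem_map.mp hk2
    have hin : p2 ∈ support.items := List.mem_of_mem_filter hp2
    have hge : p2.2 ≥ min_sup := by
      have := List.of_mem_filter hp2
      simpa using this
    have hc2 : support.getD p2.1 0 = p2.2 :=
      PySem.Dict.getD_of_mem_items support (by exact hin) hnd 0
    rw [hc2] at hthis
    simp only [decide_eq_true_eq] at hthis
    omega
  · intro h b hb
    obtain ⟨key2, hk2, rfl⟩ := List.mem_map.mp hb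
    obtain ⟨hk2K, hcond⟩ := List.mem_filter.mp hk2
    rw [Bool.and_eq_true] at hcond
    exact absurd ⟨(issubA_iff k key2).mp hcond.1, by simpa using hcond.2⟩ (h key2 hk2K)

theorem getD_foldl_insert_value {ν : Type} (l : List (List Int)) (v : List Int → ν)
    (hnd : l.Nodup) (s : List Int) (hs : s ∈ l) (d0 : ν) :
    (l.foldl (fun d x => d.insert x (v x))
      (PySem.Dict.empty : PySem.Dict (List Int) ν)).getD s d0 = v s := by
  have hitems : (l.foldl (fun d x => d.insert x (v x))
      (PySem.Dict.empty : PySem.Dict (List Int) ν)).items = l.map (fun a => (a, v a)) :=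
    PySem.Dict.items_foldl_insert_fresh l (fun a => a) v PySem.Dict.empty
      (fun a _ => by simp) (by simpa using hnd)
  have hknd : (l.foldl (fun d x => d.insert x (v x))
      (PySem.Dict.empty : PySem.Dict (List Int) ν)).keys.Nodup := by
    simp only [PySem.Dict.keys, hitems]
    simpa [List.map_map, Function.comp_def] using hnd
  refine PySem.Dict.getD_of_mem_items _ ?_ hknd d0
  rw [hitems]
  exact List.mem_map_of_mem hs

theorem getMaxPattern_eq (matrix : List (List Int)) (min_sup : Int) :
    getMaxPattern matrix min_sup = getMaxPattern_alt matrix min_sup := by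
  simp only [getMaxPattern, getMaxPattern_alt, supportB_eq]
  set support := getSupportA matrix with hsup
  have hndk : support.keys.Nodup := nodup_support_keys matrix
  set F := support.items.filter (fun p => decide (p.2 ≥ min_sup)) with hF
  have hKsub : (F.map (fun p => p.1)).Sublist support.keys := by
    rw [hF]
    simp only [PySem.Dict.keys]
    exact List.Sublist.map (fun p : List Int × Int => p.1) List.filter_sublist
  have hKnd : (F.map (fun p => p.1)).Nodup := hKsub.nodup hndk
  have hFnd : F.Nodup := hKnd.of_map
  have hKsorted : ∀ k2 ∈ F.map (fun p => p.1), k2.Pairwise (· ≤ ·) :=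
    fun k2 hk2 => mem_support_key_sorted (hKsub.mem hk2)
  have hfreq_keys : (getFreqPatternA support min_sup).keys = F.map (fun p => p.1) := by
    simp only [PySem.Dict.keys, freq_items support min_sup hndk, hF]
  rw [supersets_items _ (by rw [hfreq_keys]; exact hKnd), hfreq_keys, List.foldl_map,
    List.foldl_map]
  -- B-side counter facts (stated beta-reduced; they hold by definitional unfolding)
  have hfold : (F.foldl (fun d p => d.insert (canonB p.1) (d.getD (canonB p.1) 0 + 1))
        (PySem.Dict.empty : PySem.Dict (List Int) Int))
      = (F.map (fun p => canonB p.1)).foldl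
          (fun d x => d.insert x (d.getD x 0 + 1))
          (PySem.Dict.empty : PySem.Dict (List Int) Int) := by
    rw [List.foldl_map]
  have hsc_getD : ∀ v, (F.foldl
      (fun d p => d.insert (canonB p.1) (d.getD (canonB p.1) 0 + 1))
      (PySem.Dict.empty : PySem.Dict (List Int) Int)).getD v 0
      = ((F.map (fun p => canonB p.1)).count v : Int) := by
    intro v
    rw [hfold, PySem.Dict.getD_foldl_insert_add_one]
    simp
  have hsc_keys : (F.foldl
      (fun d p => d.insert (canonB p.1) (d.getD (canonB p.1) 0 + 1))
      (PySem.Dict.empty : PySem.Dict (List Int) Int)).keys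
      = PySem.Set.ofList (F.map (fun p => canonB p.1)) := by
    have h0 : (F.foldl (fun d p => d.insert (canonB p.1) (d.getD (canonB p.1) 0 + 1))
          (PySem.Dict.empty : PySem.Dict (List Int) Int)).keys
        = PySem.Set.update (PySem.Dict.empty : PySem.Dict (List Int) Int).keys
            (F.map (fun p => canonB p.1)) :=
      PySem.Dict.keys_foldl_insert_key F (fun p => canonB p.1)
        (fun d p => d.getD (canonB p.1) 0 + 1) (PySem.Dict.empty : PySem.Dict (List Int) Int)
    rw [h0, PySem.Dict.keys_empty, PySem.Set.update_nil_left]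
  -- pointwise equality of the two final loops
  refine congrArg PySem.Dict.items (PySem.List.foldl_congr_mem F _ _ _ (fun m p hp => ?_))
  obtain ⟨k, c⟩ := p
  dsimp only
  have hin : (k, c) ∈ support.items := List.mem_of_mem_filter (hF ▸ hp)
  have hgetD : support.getD k 0 = c := PySem.Dict.getD_of_mem_items support hin hndk 0
  have hkK : k ∈ F.map (fun p => p.1) := List.mem_map_of_mem (f := fun p => p.1) hp
  have hksorted : k.Pairwise (· ≤ ·) := hKsorted k hkK
  have hkc : canonB k ∈ PySem.Set.ofList (F.map (fun p => canonB p.1)) :=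
    (PySem.Set.mem_ofList _ _).mpr (List.mem_map_of_mem (f := fun p => canonB p.1) hp)
  have hdom : ((PySem.Set.ofList (F.map (fun p => canonB p.1))).foldl
      (fun d s => d.insert s ((PySem.Set.ofList (F.map (fun p => canonB p.1))).any
        (fun t => decide (s.length < t.length) && s.all (fun x => t.contains x))))
      (PySem.Dict.empty : PySem.Dict (List Int) Bool)).getD (canonB k) false
    = (PySem.Set.ofList (F.map (fun p => canonB p.1))).any
        (fun t => decide ((canonB k).length < t.length)
          && (canonB k).all (fun x => t.contains x)) :=
    getD_foldl_insert_value _ _ (PySem.Set.nodup_ofList _) _ hkc false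
  -- the two boolean conditions agree
  have hcond : (((F.map (fun p => p.1)).filter (fun k2 => issubA k k2 && !(k == k2))).map
        (fun key2 => decide (support.getD key2 0 < min_sup))).all (fun b => b)
      = ((F.foldl (fun d p => d.insert (canonB p.1) (d.getD (canonB p.1) 0 + 1))
            (PySem.Dict.empty : PySem.Dict (List Int) Int)).getD (canonB k) 0 == 1
          && !(((F.foldl (fun d p => d.insert (canonB p.1) (d.getD (canonB p.1) 0 + 1))
                (PySem.Dict.empty : PySem.Dict (List Int) Int)).keys.foldl
              (fun d s => d.insert s
                ((F.foldl (fun d p => d.insert (canonB p.1) (d.getD (canonB p.1) 0 + 1))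
                  (PySem.Dict.empty : PySem.Dict (List Int) Int)).keys.any
                  (fun t => decide (s.length < t.length) && s.all (fun x => t.contains x))))
              (PySem.Dict.empty : PySem.Dict (List Int) Bool)).getD (canonB k) false)) := by
    rw [Bool.eq_iff_iff]
    rw [show ((((F.map (fun p => p.1)).filter (fun k2 => issubA k k2 && !(k == k2))).map
        (fun key2 => decide (support.getD key2 0 < min_sup))).all (fun b => b)) = true
      ↔ ∀ k2 ∈ F.map (fun p => p.1), ¬((∀ x ∈ k, x ∈ k2) ∧ k ≠ k2) from by
        have h := condA_iff support min_sup hndk k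
        rw [← hF] at h
        exact h]
    rw [pv_maximal_iff (F.map (fun p => p.1)) hKsorted k hksorted]
    rw [Bool.and_eq_true, hsc_keys, hdom]
    constructor
    · rintro ⟨h1, h2⟩
      constructor
      · rw [hsc_getD]
        have hcount : (F.map (fun p => canonB p.1)).count (canonB k) = 1 := by
          rw [List.count_eq_countP, List.countP_map]
          rw [countP_eq_one_iff _ F hFnd hp (by simp)]
          intro q hq hbeq
          have hcanon : canonB q.1 = canonB k := by simpa using hbeq
          have hq1 : q.1 = k := h1 q.1 (List.mem_map_of_mem hq) hcanon
          exact map_nodup_inj (f := fun p => p.1) hKnd hq hp hq1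
        rw [hcount]
        simp
      · simp only [Bool.not_eq_true', List.any_eq_false]
        intro t ht
        rw [PySem.Set.mem_ofList] at ht
        obtain ⟨p2, hp2, rfl⟩ := List.mem_map.mp ht
        by_contra hcontra
        rw [Bool.and_eq_true] at hcontra
        obtain ⟨hlen, hall⟩ := hcontra
        refine h2 p2.1 (List.mem_map_of_mem hp2) ⟨by simpa using hlen, ?_⟩
        intro x hx
        have hxmem := (List.all_eq_true.mp hall) x hx
        simpa using hxmem
    · rintro ⟨h1, h2⟩
      constructor
      · intro k2 hk2 hcanon
        rw [hsc_getD] at h1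
        have hcount : (F.map (fun p => canonB p.1)).count (canonB k) = 1 := by
          have h1' := beq_iff_eq.mp h1
          exact_mod_cast h1'
        rw [List.count_eq_countP, List.countP_map,
          countP_eq_one_iff _ F hFnd hp (by simp)] at hcount
        obtain ⟨q, hq, rfl⟩ := List.mem_map.mp hk2
        have hqeq : q = (k, c) := hcount q hq (by simp [hcanon])
        rw [hqeq]
      · rintro k2 hk2 ⟨hlen, hsub⟩
        simp only [Bool.not_eq_true', List.any_eq_false] at h2
        obtain ⟨q, hq, rfl⟩ := List.mem_map.mp hk2
        have hfalse := h2 (canonB q.1)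
          (by rw [PySem.Set.mem_ofList]; exact List.mem_map_of_mem hq)
        have htrue : (decide ((canonB k).length < (canonB q.1).length)
            && (canonB k).all (fun x => (canonB q.1).contains x)) = true := by
          rw [Bool.and_eq_true]
          refine ⟨by simpa using hlen, List.all_eq_true.mpr (fun x hx => ?_)⟩
          simpa using hsub x hx
        exact hfalse htrue
  rw [hcond, hgetD]
-- ===== VERDICT (by name: the statement is the Claim_ definition above) =====
theorem getMaxPattern_spec : Claim_equal_getMaxPattern := by
  intro matrix min_sup _
  unfold Spec_getMaxPattern
  exact getMaxPattern_eq matrix min_sup
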